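-- pv_equiv track=rewrite | github.com/MrBrantCode/unitest_baseline | mut_generate/mist_train_taco/taco_3423/solution.py | check_polygon_with_midpoints
-- ===== SOURCE A (Python) =====
-- def check_polygon_with_midpoints(arr, N, midpoints):
--     for j in range(midpoints):
--         val = 1
--         for k in range(j, N, midpoints):
--             val &= arr[k]
--         if val and N // midpoints > 2:
--             return True
--     return False
-- ===== SOURCE B (Python) =====
-- def check_polygon_with_midpoints(arr, N, midpoints):
--     if midpoints <= 0:
--         return False
--     ok = [1] * midpoints
--     for k in range(min(N, len(arr))):
--         ok[k % midpoints] &= arr[k]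
--     return any(ok) and N // midpoints > 2
-- ===== Notes on version B (the rewrite author's own statement) =====
-- stated objective: alternative
-- what changed: Replaced the nested residue-class/strided loops with one sequential pass over the available elements maintaining a per-residue AND accumulator table (cache-friendly single scan), followed by a single any() test.
-- outside the precondition, e.g. on check_polygon_with_midpoints([1, 1, 1, 1, 1, 1, 1], 8, 2): A returns True, B returns True; on check_polygon_with_midpoints([1], 8, 2): A raises IndexError, B returns True
import Mathlib
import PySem

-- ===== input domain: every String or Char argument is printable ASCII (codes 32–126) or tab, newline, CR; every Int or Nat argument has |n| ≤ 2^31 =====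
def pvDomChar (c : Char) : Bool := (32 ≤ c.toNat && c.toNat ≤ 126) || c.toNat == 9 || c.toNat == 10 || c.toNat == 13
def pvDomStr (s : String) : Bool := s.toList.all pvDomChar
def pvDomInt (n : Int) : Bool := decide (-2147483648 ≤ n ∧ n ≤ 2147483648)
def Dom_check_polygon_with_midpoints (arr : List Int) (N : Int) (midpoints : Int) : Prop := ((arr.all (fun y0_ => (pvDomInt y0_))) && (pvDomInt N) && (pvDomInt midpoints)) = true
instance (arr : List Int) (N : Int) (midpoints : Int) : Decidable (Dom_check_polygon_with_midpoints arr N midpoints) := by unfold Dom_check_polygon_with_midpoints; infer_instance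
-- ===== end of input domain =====

-- B replaces A's nested strided residue-class loops by one linear pass over the available
-- elements maintaining a per-residue AND-accumulator table; same cost, different decomposition
-- (objective: alternative).

-- ===== PORT A =====
-- inner loop: for k in range(j, N, midpoints): val &= arr[k]
def pvAInner (arr : List Int) (N mid j : Int) : Int :=
  (PySem.List.pyRange j N mid).foldl
    (fun val k => PySem.Int.band val (PySem.List.pyGetD arr k 0)) 1

-- outer loop with early return: for j in range(midpoints): … if val and N//midpoints > 2: return True
def pvALoop (arr : List Int) (N mid : Int) : List Int → Bool
  | [] => false
  | j :: js =>
    let val := pvAInner arr N mid j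
    if val ≠ 0 ∧ PySem.Int.floordiv N mid > 2 then true else pvALoop arr N mid js

def check_polygon_with_midpoints (arr : List Int) (N : Int) (midpoints : Int) : Bool :=
  pvALoop arr N midpoints (PySem.List.pyRange 0 midpoints 1)

-- ===== PORT B =====
-- one step of B's single pass: ok[k % midpoints] &= arr[k]
def pvBStep (arr : List Int) (mid : Int) (ok : List Int) (k : Int) : List Int :=
  let i := (PySem.Int.mod k mid).toNat
  ok.set i (PySem.Int.band (ok.getD i 0) (PySem.List.pyGetD arr k 0))

def check_polygon_with_midpoints_alt (arr : List Int) (N : Int) (midpoints : Int) : Bool :=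
  if midpoints ≤ 0 then false
  else
    let ok := (PySem.List.pyRange 0 (min N (arr.length : Int)) 1).foldl (pvBStep arr midpoints)
                (List.replicate midpoints.toNat 1)
    (ok.any (fun v => v != 0)) && decide (PySem.Int.floordiv N midpoints > 2)

-- ===== PRECONDITION & SPEC =====
-- Pre_ excludes inputs with midpoints > 0 and N > len(arr): there A's strided scan raises
-- IndexError, except when an earlier fully-in-range residue class already returns True before
-- any out-of-range access — and on those excluded return-inputs B returns the same True
-- (see the cited example), so nothing B mismatches is hidden; the crash condition itself is
-- value-dependent, hence the whole region is outside the closed-form Pre_.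
def Pre_check_polygon_with_midpoints (arr : List Int) (N : Int) (midpoints : Int) : Prop :=
  midpoints ≤ 0 ∨ N ≤ (arr.length : Int)
instance (arr : List Int) (N : Int) (midpoints : Int) : Decidable (Pre_check_polygon_with_midpoints arr N midpoints) := by unfold Pre_check_polygon_with_midpoints; infer_instance

def pvWitness_check_polygon_with_midpoints : List Int × Int × Int := ([1, 3, 5, 2, 7, 9], 6, 2)

def Spec_check_polygon_with_midpoints (arr : List Int) (N : Int) (midpoints : Int) (out : Bool) : Prop := out = check_polygon_with_midpoints_alt arr N midpoints
instance (arr : List Int) (N : Int) (midpoints : Int) (out : Bool) : Decidable (Spec_check_polygon_with_midpoints arr N midpoints out) := by unfold Spec_check_polygon_with_midpoints; infer_instance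

-- ===== CLAIM (what is proved, stated in full; the proofs are below) =====
def Claim_equal_check_polygon_with_midpoints : Prop := ∀ (arr : List Int) (N : Int) (midpoints : Int), Dom_check_polygon_with_midpoints arr N midpoints → Pre_check_polygon_with_midpoints arr N midpoints → Spec_check_polygon_with_midpoints arr N midpoints (check_polygon_with_midpoints arr N midpoints)

-- ===== LEMMAS AND PROOFS =====

-- A's early-return loop is an existence test over the residue list
theorem pvALoop_eq_any (arr : List Int) (N mid : Int) (js : List Int) :
    pvALoop arr N mid js
      = js.any (fun j => decide (pvAInner arr N mid j ≠ 0 ∧ PySem.Int.floordiv N mid > 2)) := by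
  induction js with
  | nil => rfl
  | cons j js ih =>
    simp only [pvALoop, List.any_cons, ih]
    split_ifs with h
    · simp [h]
    · simp [h]

-- a constant conjunct distributes out of any
theorem pv_any_and_const (l : List Int) (p : Int → Bool) (c : Bool) :
    l.any (fun x => p x && c) = (l.any p && c) := by
  induction l with
  | nil => simp
  | cons x t ih => cases c <;> simp_all

-- the strided range is the unit-step range filtered to one residue class
theorem pvRange_stride_eq_filter (b m j : Int) (hm : 0 < m) (hj0 : 0 ≤ j) (hjm : j < m) :
    PySem.List.pyRange j b m
      = (PySem.List.pyRange 0 b 1).filter (fun k => PySem.Int.mod k m == j) := by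
  have hjj : j % m = j := Int.emod_eq_of_lt hj0 hjm
  have hmem : ∀ x : Int, x ∈ PySem.List.pyRange j b m ↔
      x ∈ (PySem.List.pyRange 0 b 1).filter (fun k => PySem.Int.mod k m == j) := by
    intro x
    rw [PySem.List.mem_pyRange_iff_of_pos hm, List.mem_filter, PySem.List.mem_pyRange_one]
    simp only [beq_iff_eq, PySem.Int.mod_eq_emod_of_pos hm]
    constructor
    · rintro ⟨h1, h2, h3⟩
      have : x % m = j % m := by
        rw [Int.emod_eq_emod_iff_emod_sub_eq_zero]
        exact Int.emod_eq_zero_of_dvd h3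
      exact ⟨⟨by omega, h2⟩, by omega⟩
    · rintro ⟨⟨h0, h2⟩, h3⟩
      have hdvd : m ∣ x - j := by
        rw [Int.dvd_iff_emod_eq_zero, ← Int.emod_eq_emod_iff_emod_sub_eq_zero]
        omega
      refine ⟨?_, h2, hdvd⟩
      obtain ⟨c, hc⟩ := hdvd
      by_cases h : j ≤ x
      · exact h
      · exfalso
        have h' : x < j := by omega
        have hc0 : c < 0 := by nlinarith
        nlinarith
  have pw1 : (PySem.List.pyRange j b m).Pairwise (· < ·) := by
    rw [PySem.List.pyRange_of_pos j b hm]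
    refine List.Pairwise.map _ ?_ List.pairwise_lt_range
    intro a b hab
    have : (a : Int) < (b : Int) := by exact_mod_cast hab
    nlinarith
  have pw2 : ((PySem.List.pyRange 0 b 1).filter (fun k => PySem.Int.mod k m == j)).Pairwise (· < ·) :=
    List.Pairwise.filter _ (PySem.List.pairwise_lt_pyRange_one 0 b)
  have perm : (PySem.List.pyRange j b m).Perm
      ((PySem.List.pyRange 0 b 1).filter (fun k => PySem.Int.mod k m == j)) :=
    (List.perm_ext_iff_of_nodup (pw1.imp ne_of_lt) (pw2.imp ne_of_lt)).mpr hmem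
  exact List.Perm.eq_of_pairwise (fun a b _ _ hab hba => le_antisymm hab hba)
    (pw1.imp le_of_lt) (pw2.imp le_of_lt) perm

theorem pvRange_stride_nil (m j : Int) (hm : 0 < m) (hj0 : 0 ≤ j) :
    PySem.List.pyRange j 0 m = [] := by
  rw [PySem.List.pyRange_of_pos j 0 hm, if_neg (by omega)]
  simp

-- appending index t to the scanned prefix extends exactly class (t % m)
theorem pvAInner_succ (arr : List Int) (m j : Int) (t : Nat) (hm : 0 < m)
    (hj0 : 0 ≤ j) (hjm : j < m) :
    pvAInner arr ((t : Int) + 1) m j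
      = if PySem.Int.mod (t : Int) m = j
          then PySem.Int.band (pvAInner arr (t : Int) m j) (PySem.List.pyGetD arr (t : Int) 0)
          else pvAInner arr (t : Int) m j := by
  unfold pvAInner
  rw [pvRange_stride_eq_filter _ _ _ hm hj0 hjm, pvRange_stride_eq_filter _ _ _ hm hj0 hjm,
    PySem.List.pyRange_one_succ_right (by positivity : (0:Int) ≤ (t:Int)),
    List.filter_append, List.foldl_append]
  by_cases h : PySem.Int.mod (t : Int) m = j
  · simp [h]
  · simp [h]

-- B's table after scanning range(t) holds the per-class ANDs of the prefix
theorem pvB_invariant (arr : List Int) (m : Int) (hm : 0 < m) (t : Nat) :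
    (PySem.List.pyRange 0 (t : Int) 1).foldl (pvBStep arr m) (List.replicate m.toNat 1)
      = (List.range m.toNat).map (fun j : Nat => pvAInner arr (t : Int) m (j : Int)) := by
  induction t with
  | zero =>
    rw [show ((0:Nat):Int) = 0 by rfl, PySem.List.pyRange_one_eq_nil le_rfl, List.foldl_nil]
    apply List.ext_getElem (by simp)
    intro i h1 h2
    simp only [List.getElem_replicate, List.getElem_map, List.getElem_range]
    unfold pvAInner
    rw [pvRange_stride_nil m i hm (by positivity)]
    rfl
  | succ t ih =>
    have hcast : ((t + 1 : Nat) : Int) = (t : Int) + 1 := by push_cast; ring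
    rw [hcast, PySem.List.pyRange_one_succ_right (by positivity : (0:Int) ≤ (t:Int)),
      List.foldl_append, ih]
    unfold pvBStep
    simp only [List.foldl_cons, List.foldl_nil]
    have hmodlt : PySem.Int.mod (t : Int) m < m := PySem.Int.mod_lt _ hm
    have hmod0 : 0 ≤ PySem.Int.mod (t : Int) m := PySem.Int.mod_nonneg _ hm
    set i := (PySem.Int.mod (t : Int) m).toNat with hi
    have hilt : i < m.toNat := by omega
    apply List.ext_getElem (by simp)
    intro p h1 h2
    simp only [List.getElem_set, List.getElem_map, List.getElem_range]
    have hplt : p < m.toNat := by simpa using h2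
    rw [pvAInner_succ arr m p t hm (by positivity) (by omega)]
    have hmi : PySem.Int.mod (t : Int) m = (i : Int) := by omega
    by_cases hip : i = p
    · rw [if_pos hip, if_pos (by omega)]
      rw [PySem.List.getD_map_range _ _ _ _ hilt, hip]
    · rw [if_neg hip, if_neg (by omega)]

-- the two residue-class summaries coincide once midpoints > 0
theorem pv_main (arr : List Int) (N m : Int) (hm : 0 < m) :
    (PySem.List.pyRange 0 m 1).any (fun j => decide (pvAInner arr N m j ≠ 0))
      = ((PySem.List.pyRange 0 N 1).foldl (pvBStep arr m) (List.replicate m.toNat 1)).any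
          (fun v => v != 0) := by
  by_cases hN : 0 ≤ N
  · rw [show N = ((N.toNat : Nat) : Int) by omega, pvB_invariant arr m hm N.toNat,
      PySem.List.pyRange_one 0 m, List.any_map, List.any_map]
    simp only [sub_zero]
    congr 1
    funext j
    simp only [Function.comp, zero_add, bne, decide_not, Bool.beq_eq_decide_eq]
  · have hN0 : N ≤ 0 := by omega
    rw [PySem.List.pyRange_one_eq_nil hN0, List.foldl_nil]
    have hL : (PySem.List.pyRange 0 m 1).any (fun j => decide (pvAInner arr N m j ≠ 0)) = true := by
      refine List.any_eq_true.mpr ⟨0, (PySem.List.mem_pyRange_one).mpr ⟨le_rfl, hm⟩, ?_⟩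
      have : pvAInner arr N m 0 = 1 := by
        unfold pvAInner
        rw [PySem.List.pyRange_of_pos 0 N hm, if_neg (by omega)]
        rfl
      simp [this]
    have hR : (List.replicate m.toNat 1).any (fun v => (v : Int) != 0) = true := by
      refine List.any_eq_true.mpr ⟨1, ?_, by decide⟩
      exact List.mem_replicate.mpr ⟨by omega, rfl⟩
    rw [hL, hR]

-- ===== VERDICT (by name: the statement is the Claim_ definition above) =====
theorem check_polygon_with_midpoints_spec : Claim_equal_check_polygon_with_midpoints := by
  intro arr N mid _ hpre
  unfold Spec_check_polygon_with_midpoints check_polygon_with_midpoints check_polygon_with_midpoints_alt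
  by_cases hm : mid ≤ 0
  · simp [hm, PySem.List.pyRange_one_eq_nil hm, pvALoop]
  · have hm' : 0 < mid := by omega
    have hNle : N ≤ (arr.length : Int) := by
      rcases hpre with h | h
      · omega
      · exact h
    have hmin : min N (arr.length : Int) = N := min_eq_left hNle
    simp only [if_neg hm, hmin]
    rw [pvALoop_eq_any]
    have hsplit : ∀ j : Int, (decide (pvAInner arr N mid j ≠ 0 ∧ PySem.Int.floordiv N mid > 2))
        = (decide (pvAInner arr N mid j ≠ 0) && decide (PySem.Int.floordiv N mid > 2)) := by
      intro j; by_cases h : PySem.Int.floordiv N mid > 2 <;> simp [h]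
    simp only [hsplit]
    rw [pv_any_and_const, pv_main arr N mid hm']
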